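-- pv_equiv track=rewrite | github.com/ariffazil/arifos-geox | arifOS-model-registry/soul_merger.py | _infer_depth
-- ===== SOURCE A (Python) =====
-- def _infer_depth(reasoning: list[str]) -> str:
--     """Infer reasoning depth from reasoning style."""
--     if not reasoning:
--         return "unknown"
--     if any(s in reasoning for s in ["depth_first", "think_slow", "identify_assumptions"]):
--         return "deep"
--     if any(s in reasoning for s in ["step_by_step", "systematic", "iterative"]):
--         return "medium"
--     return "shallow"
-- ===== SOURCE B (Python) =====
-- _RANK = {
--     "depth_first": 2, "think_slow": 2, "identify_assumptions": 2,
--     "step_by_step": 1, "systematic": 1, "iterative": 1,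
-- }
-- _NAME = {0: "shallow", 1: "medium", 2: "deep"}
--
-- def _infer_depth(reasoning: list[str]) -> str:
--     """Infer reasoning depth from reasoning style."""
--     if not reasoning:
--         return "unknown"
--     best = 0
--     for s in reasoning:
--         best = max(best, _RANK.get(s, 0))
--     return _NAME[best]
-- ===== Notes on version B (the rewrite author's own statement) =====
-- stated objective: alternative
-- what changed: Replaced the two any(keyword in reasoning) membership scans with a single pass over reasoning that takes the maximum rank from a keyword->rank table and maps the max back to a label.
import Mathlib
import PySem

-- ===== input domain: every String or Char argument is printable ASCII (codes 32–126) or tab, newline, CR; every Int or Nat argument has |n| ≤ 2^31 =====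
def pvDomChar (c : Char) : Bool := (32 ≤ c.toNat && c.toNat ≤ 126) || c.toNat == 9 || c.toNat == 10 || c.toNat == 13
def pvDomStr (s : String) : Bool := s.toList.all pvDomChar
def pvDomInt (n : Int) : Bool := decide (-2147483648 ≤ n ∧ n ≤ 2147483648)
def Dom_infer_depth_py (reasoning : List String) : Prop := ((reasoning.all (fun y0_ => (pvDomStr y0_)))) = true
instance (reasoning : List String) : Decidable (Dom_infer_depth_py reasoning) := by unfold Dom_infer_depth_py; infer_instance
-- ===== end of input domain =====

-- B replaces A's two any(keyword in reasoning) membership scans with one pass keeping the max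
-- rank from a keyword->rank table (alternative decomposition; same observable behaviour).

-- ===== PORT A =====
def infer_depth_py (reasoning : List String) : String :=
  if reasoning = [] then "unknown"
  else if ["depth_first", "think_slow", "identify_assumptions"].any
            (fun s => reasoning.contains s) then "deep"
  else if ["step_by_step", "systematic", "iterative"].any
            (fun s => reasoning.contains s) then "medium"
  else "shallow"

-- ===== PORT B =====
def pvRankDict : PySem.Dict String Nat :=
  PySem.Dict.mk [("depth_first", 2), ("think_slow", 2), ("identify_assumptions", 2),
                     ("step_by_step", 1), ("systematic", 1), ("iterative", 1)]

def pvNameDict : PySem.Dict Nat String :=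
  PySem.Dict.mk [(0, "shallow"), (1, "medium"), (2, "deep")]

def infer_depth_py_alt (reasoning : List String) : String :=
  if reasoning = [] then "unknown"
  else
    let best := reasoning.foldl (fun b s => max b (pvRankDict.getD s 0)) 0
    -- _NAME[best]: best is always 0, 1 or 2, so the key is present (default never used)
    pvNameDict.getD best ""

-- ===== PRECONDITION & SPEC =====
def Spec_infer_depth_py (reasoning : List String) (out : String) : Prop := out = infer_depth_py_alt reasoning
instance (reasoning : List String) (out : String) : Decidable (Spec_infer_depth_py reasoning out) := by unfold Spec_infer_depth_py; infer_instance

-- ===== CLAIM (what is proved, stated in full; the proofs are below) =====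
def Claim_equal_infer_depth_py : Prop := ∀ (reasoning : List String), Dom_infer_depth_py reasoning → Spec_infer_depth_py reasoning (infer_depth_py reasoning)

-- ===== LEMMAS AND PROOFS =====

def pvRank (s : String) : Nat := pvRankDict.getD s 0

def pvMaxR : List String → Nat
  | [] => 0
  | s :: t => max (pvRank s) (pvMaxR t)

def pvDeep (s : String) : Prop :=
  s = "depth_first" ∨ s = "think_slow" ∨ s = "identify_assumptions"

def pvMed (s : String) : Prop :=
  s = "step_by_step" ∨ s = "systematic" ∨ s = "iterative"

theorem pvFoldl_eq_maxR (xs : List String) (acc : Nat) :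
    xs.foldl (fun b s => max b (pvRank s)) acc = max acc (pvMaxR xs) := by
  induction xs generalizing acc with
  | nil => simp [pvMaxR]
  | cons s t ih => simp [List.foldl, pvMaxR, ih, Nat.max_assoc]

theorem pvRank_cases (s : String) :
    (pvRank s = 2 ∧ pvDeep s) ∨ (pvRank s = 1 ∧ pvMed s)
    ∨ (pvRank s = 0 ∧ ¬ pvDeep s ∧ ¬ pvMed s) := by
  unfold pvDeep pvMed
  by_cases h1 : s = "depth_first"; · subst h1; left; exact ⟨by decide, by tauto⟩
  by_cases h2 : s = "think_slow"; · subst h2; left; exact ⟨by decide, by tauto⟩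
  by_cases h3 : s = "identify_assumptions"; · subst h3; left; exact ⟨by decide, by tauto⟩
  by_cases h4 : s = "step_by_step"; · subst h4; right; left; exact ⟨by decide, by tauto⟩
  by_cases h5 : s = "systematic"; · subst h5; right; left; exact ⟨by decide, by tauto⟩
  by_cases h6 : s = "iterative"; · subst h6; right; left; exact ⟨by decide, by tauto⟩
  right; right
  refine ⟨?_, by tauto, by tauto⟩
  simp only [pvRank, pvRankDict, PySem.Dict.getD, PySem.Dict.get?_mk_cons, beq_iff_eq]
  simp [PySem.Dict.get?, Ne.symm h1, Ne.symm h2, Ne.symm h3,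
    Ne.symm h4, Ne.symm h5, Ne.symm h6]

theorem pvRank_le_two (s : String) : pvRank s ≤ 2 := by
  rcases pvRank_cases s with ⟨h, _⟩ | ⟨h, _⟩ | ⟨h, _, _⟩ <;> omega

theorem pvRank_of_deep (s : String) (h : pvDeep s) : pvRank s = 2 := by
  rcases h with h | h | h <;> subst h <;> decide

theorem pvDeep_of_rank_two (s : String) (h : pvRank s = 2) : pvDeep s := by
  rcases pvRank_cases s with ⟨_, hs⟩ | ⟨h1, _⟩ | ⟨h1, _, _⟩ <;> first | exact hs | omega

theorem pvMaxR_le_two (xs : List String) : pvMaxR xs ≤ 2 := by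
  induction xs with
  | nil => simp [pvMaxR]
  | cons s t ih => have := pvRank_le_two s; simp only [pvMaxR]; omega

theorem pvMaxR_eq_two_iff (xs : List String) :
    pvMaxR xs = 2 ↔ ∃ s ∈ xs, pvDeep s := by
  induction xs with
  | nil => simp [pvMaxR]
  | cons s t ih =>
    simp only [pvMaxR, List.mem_cons]
    constructor
    · intro hx
      by_cases h : pvRank s = 2
      · exact ⟨s, Or.inl rfl, pvDeep_of_rank_two s h⟩
      · have hle := pvRank_le_two s
        have : pvMaxR t = 2 := by omega
        obtain ⟨u, hu, hku⟩ := ih.mp this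
        exact ⟨u, Or.inr hu, hku⟩
    · rintro ⟨u, hu | hu, hku⟩
      · subst hu
        have := pvRank_of_deep u hku
        have := pvMaxR_le_two t; omega
      · have := ih.mpr ⟨u, hu, hku⟩
        have := pvRank_le_two s; omega

theorem pvMaxR_pos_iff (xs : List String) :
    1 ≤ pvMaxR xs ↔ ∃ s ∈ xs, 1 ≤ pvRank s := by
  induction xs with
  | nil => simp [pvMaxR]
  | cons s t ih =>
    simp only [pvMaxR, List.mem_cons]
    constructor
    · intro hx
      by_cases h : 1 ≤ pvRank s
      · exact ⟨s, Or.inl rfl, h⟩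
      · have : 1 ≤ pvMaxR t := by omega
        obtain ⟨u, hu, hru⟩ := ih.mp this
        exact ⟨u, Or.inr hu, hru⟩
    · rintro ⟨u, hu | hu, hru⟩
      · subst hu; omega
      · have := ih.mpr ⟨u, hu, hru⟩; omega

theorem pvRank_pos_iff (s : String) : 1 ≤ pvRank s ↔ (pvDeep s ∨ pvMed s) := by
  rcases pvRank_cases s with ⟨h, hs⟩ | ⟨h, hs⟩ | ⟨h, hs1, hs2⟩ <;>
    constructor <;> intro hx <;> first | tauto | omega

theorem pvAnyDeep (r : List String) :
    ((["depth_first", "think_slow", "identify_assumptions"].any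
        (fun s => r.contains s)) = true)
      ↔ ("depth_first" ∈ r ∨ "think_slow" ∈ r ∨ "identify_assumptions" ∈ r) := by
  simp

theorem pvAnyMed (r : List String) :
    ((["step_by_step", "systematic", "iterative"].any
        (fun s => r.contains s)) = true)
      ↔ ("step_by_step" ∈ r ∨ "systematic" ∈ r ∨ "iterative" ∈ r) := by
  simp

-- ===== VERDICT (by name: the statement is the Claim_ definition above) =====
theorem infer_depth_py_spec : Claim_equal_infer_depth_py := by
  intro reasoning _
  unfold Spec_infer_depth_py infer_depth_py infer_depth_py_alt
  by_cases hne : reasoning = []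
  · simp [hne]
  · simp only [hne, if_false]
    rw [show (fun b s => max b (pvRankDict.getD s 0)) = (fun b s => max b (pvRank s)) from rfl,
        pvFoldl_eq_maxR]
    simp only [Nat.zero_max]
    by_cases hd : ("depth_first" ∈ reasoning ∨ "think_slow" ∈ reasoning
                    ∨ "identify_assumptions" ∈ reasoning)
    · have h2 : pvMaxR reasoning = 2 := by
        rw [pvMaxR_eq_two_iff]
        rcases hd with h | h | h
        · exact ⟨_, h, Or.inl rfl⟩
        · exact ⟨_, h, Or.inr (Or.inl rfl)⟩
        · exact ⟨_, h, Or.inr (Or.inr rfl)⟩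
      rw [h2, if_pos ((pvAnyDeep reasoning).mpr hd)]
      decide
    · have hd2 : ¬ ∃ s ∈ reasoning, pvDeep s := by
        rintro ⟨s, hs, h | h | h⟩ <;> subst h <;> tauto
      rw [if_neg (fun h => hd ((pvAnyDeep reasoning).mp h))]
      have hne2 : pvMaxR reasoning ≠ 2 := fun h => hd2 ((pvMaxR_eq_two_iff _).mp h)
      by_cases hm : ("step_by_step" ∈ reasoning ∨ "systematic" ∈ reasoning
                      ∨ "iterative" ∈ reasoning)
      · have h1 : pvMaxR reasoning = 1 := by
          have hp : 1 ≤ pvMaxR reasoning := by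
            rw [pvMaxR_pos_iff]
            rcases hm with h | h | h
            · exact ⟨_, h, (pvRank_pos_iff _).mpr (Or.inr (Or.inl rfl))⟩
            · exact ⟨_, h, (pvRank_pos_iff _).mpr (Or.inr (Or.inr (Or.inl rfl)))⟩
            · exact ⟨_, h, (pvRank_pos_iff _).mpr (Or.inr (Or.inr (Or.inr rfl)))⟩
          have := pvMaxR_le_two reasoning; omega
        rw [h1, if_pos ((pvAnyMed reasoning).mpr hm)]
        decide
      · have h0 : pvMaxR reasoning = 0 := by
          by_contra h
          have hp : 1 ≤ pvMaxR reasoning := by omega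
          obtain ⟨s, hs, hrs⟩ := (pvMaxR_pos_iff _).mp hp
          rcases (pvRank_pos_iff s).mp hrs with h' | h'
          · exact hd2 ⟨s, hs, h'⟩
          · rcases h' with h' | h' | h' <;> subst h' <;> tauto
        rw [h0, if_neg (fun h => hm ((pvAnyMed reasoning).mp h))]
        decide
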